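-- pv_equiv track=rewrite | github.com/Dennis-coder/AoC2023 | day9/solution.py | part2
-- ===== SOURCE A (Python) =====
-- def part2(data):
--     sum = 0
--     for derivatives in data:
--         val = 0
--         for derivative in derivatives[::-1]:
--             val = derivative[0] - val
--         sum += val
--     return sum
-- ===== SOURCE B (Python) =====
-- def part2(data):
--     total = 0
--     for derivatives in data:
--         sign = 1
--         for derivative in derivatives:
--             total += sign * derivative[0]
--             sign = -sign
--     return total
-- ===== Notes on version B (the rewrite author's own statement) =====
-- stated objective: alternative
-- what changed: Replaces the fed-back subtractive accumulator over the reversed list (val = d[0] - val) with a single forward pass that adds each sequence head directly into the running total with a sign flipped by index parity.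
import Mathlib
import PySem

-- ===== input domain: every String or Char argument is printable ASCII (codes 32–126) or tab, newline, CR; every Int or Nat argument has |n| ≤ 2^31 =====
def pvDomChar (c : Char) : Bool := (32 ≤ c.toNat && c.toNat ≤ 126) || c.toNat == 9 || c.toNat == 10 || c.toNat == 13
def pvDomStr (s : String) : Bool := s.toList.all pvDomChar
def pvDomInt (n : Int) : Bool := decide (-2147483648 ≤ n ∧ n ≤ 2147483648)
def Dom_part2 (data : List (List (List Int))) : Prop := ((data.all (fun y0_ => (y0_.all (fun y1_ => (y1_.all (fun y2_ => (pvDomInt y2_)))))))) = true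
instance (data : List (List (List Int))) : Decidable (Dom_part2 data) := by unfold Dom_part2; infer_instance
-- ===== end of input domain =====

-- B replaces A's fed-back subtractive accumulator over the reversed list with one forward
-- pass adding each head under a parity-flipped sign (objective: alternative decomposition).

-- ===== PORT A =====
-- derivative[0] is ported as (pyGet? d 0).getD 0; the default is never reached under
-- Pre_part2 (empty inner lists, where Python raises IndexError, are excluded).
def part2 (data : List (List (List Int))) : Int :=
  data.foldl
    (fun sum derivatives =>
      sum +
        ((PySem.List.slice? derivatives none none (-1)).getD []).foldl
          (fun val derivative => (PySem.List.pyGet? derivative 0).getD 0 - val) 0)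
    0

-- ===== PORT B =====
def part2_alt (data : List (List (List Int))) : Int :=
  data.foldl
    (fun total derivatives =>
      (derivatives.foldl
          (fun p derivative =>
            (p.1 + p.2 * ((PySem.List.pyGet? derivative 0).getD 0), -p.2))
          (total, (1 : Int))).1)
    0

-- ===== PRECONDITION & SPEC =====
-- Pre_ excludes inputs containing an empty innermost list: there Python A (and B) raise
-- IndexError on derivative[0].
def Pre_part2 (data : List (List (List Int))) : Prop :=
  ∀ ds ∈ data, ∀ d ∈ ds, d ≠ []
instance (data : List (List (List Int))) : Decidable (Pre_part2 data) := by
  unfold Pre_part2; infer_instance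
def pvWitness_part2 : List (List (List Int)) := [[[1], [2, 3], [4]], [[5]]]
def Spec_part2 (data : List (List (List Int))) (out : Int) : Prop := out = part2_alt data
instance (data : List (List (List Int))) (out : Int) : Decidable (Spec_part2 data out) := by unfold Spec_part2; infer_instance

-- ===== CLAIM (what is proved, stated in full; the proofs are below) =====
def Claim_equal_part2 : Prop := ∀ (data : List (List (List Int))), Dom_part2 data → Pre_part2 data → Spec_part2 data (part2 data)

-- ===== LEMMAS AND PROOFS =====

def pvHead0 (d : List Int) : Int := (PySem.List.pyGet? d 0).getD 0

def pvAltSum : List (List Int) → Int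
  | [] => 0
  | d :: r => pvHead0 d - pvAltSum r

theorem pvInnerA (ds : List (List Int)) :
    ds.reverse.foldl (fun val d => pvHead0 d - val) 0 = pvAltSum ds := by
  induction ds with
  | nil => rfl
  | cons d r ih => simp [List.foldl_append, pvAltSum, ih]

theorem pvInnerB (ds : List (List Int)) : ∀ (t s : Int),
    (ds.foldl (fun p d => (p.1 + p.2 * pvHead0 d, -p.2)) (t, s)).1 = t + s * pvAltSum ds := by
  induction ds with
  | nil => intro t s; simp [pvAltSum]
  | cons d r ih =>
      intro t s
      simp only [List.foldl_cons, pvAltSum, ih]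
      ring

theorem pvOuter (data : List (List (List Int))) : ∀ (acc : Int),
    data.foldl
      (fun sum ds =>
        sum + ds.reverse.foldl (fun val d => pvHead0 d - val) 0) acc
    = data.foldl
      (fun total ds =>
        (ds.foldl (fun p d => (p.1 + p.2 * pvHead0 d, -p.2)) (total, (1 : Int))).1) acc := by
  intro acc
  simp only [pvInnerA, pvInnerB, one_mul]

-- ===== VERDICT (by name: the statement is the Claim_ definition above) =====
theorem part2_spec : Claim_equal_part2 := by
  intro data _ _
  unfold Spec_part2 part2 part2_alt
  simp only [PySem.List.slice?_none_none_neg_one, Option.getD_some]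
  exact pvOuter data 0
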